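-- pv_equiv track=rewrite | github.com/nick-silantro/substrate-test | _system/scripts/schema-delete-dimension.py | delete_dimension_block
-- ===== SOURCE A (Python) =====
-- def delete_dimension_block(content: str, name: str) -> tuple[str, bool]:
--     """
--     Remove a dimension's block from attributes.yaml.
--     Dimension entries are at 2-space indent (under the top-level dimensions: key).
--     Returns (updated_content, found).
--     """
--     lines = content.split("\n")
--     result = []
--     in_block = False
--     found = False
--     i = 0
--
--     while i < len(lines):
--         line = lines[i]
--         stripped = line.lstrip()
--         indent = len(line) - len(stripped)
--
--         if line.rstrip() == f"  {name}:" or line.startswith(f"  {name}: "):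
--             in_block = True
--             found = True
--             # Remove preceding blank line if present
--             if result and result[-1].strip() == "":
--                 result.pop()
--             i += 1
--             continue
--
--         if in_block:
--             # Block ends when we hit something at ≤ 2-space indent
--             if stripped and indent <= 2:
--                 in_block = False
--                 result.append(line)
--             # else: skip (part of deleted block)
--             i += 1
--             continue
--
--         result.append(line)
--         i += 1
--
--     return "\n".join(result), found
-- ===== SOURCE B (Python) =====
-- def _skip_block(lines, i, out, is_header):
--     """Advance i past a dimension block's body; returns the first index not in the block."""
--     n = len(lines)
--     while i < n:
--         line = lines[i]
--         if is_header(line):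
--             # a repeated header restarts the block (and eats a trailing blank, as A does)
--             if out and out[-1].strip() == "":
--                 out.pop()
--             i += 1
--         elif line.lstrip() == "" or len(line) - len(line.lstrip()) > 2:
--             i += 1
--         else:
--             break
--     return i
--
--
-- def delete_dimension_block(content: str, name: str) -> tuple[str, bool]:
--     lines = content.split("\n")
--     header_line = "  " + name + ":"
--     header_pref = "  " + name + ": "
--
--     def is_header(line):
--         return line.rstrip() == header_line or line.startswith(header_pref)
--
--     out = []
--     found = False
--     i = 0
--     n = len(lines)
--     while i < n:
--         if is_header(lines[i]):
--             found = True
--             if out and out[-1].strip() == "":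
--                 out.pop()
--             i = _skip_block(lines, i + 1, out, is_header)
--         else:
--             out.append(lines[i])
--             i += 1
--     return "\n".join(out), found
-- ===== Notes on version B (the rewrite author's own statement) =====
-- stated objective: alternative
-- what changed: Replaced A's single loop with in_block/found state flags by a find-header-then-skip-span decomposition: an outer copy loop that, on a header line, calls an inner helper that consumes the whole block body (handling repeated headers and the preceding-blank pop) and returns the resume index.
import Mathlib
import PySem

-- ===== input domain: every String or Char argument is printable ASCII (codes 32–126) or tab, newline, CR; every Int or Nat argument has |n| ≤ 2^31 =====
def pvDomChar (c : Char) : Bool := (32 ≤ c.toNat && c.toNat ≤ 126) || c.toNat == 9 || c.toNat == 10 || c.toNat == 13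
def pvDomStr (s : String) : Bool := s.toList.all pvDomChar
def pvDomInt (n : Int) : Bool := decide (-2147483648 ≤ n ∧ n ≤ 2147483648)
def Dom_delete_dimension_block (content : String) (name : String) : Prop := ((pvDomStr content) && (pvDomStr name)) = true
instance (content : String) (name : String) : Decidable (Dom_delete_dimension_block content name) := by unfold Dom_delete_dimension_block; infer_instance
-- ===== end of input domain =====

-- B replaces A's in_block/found state machine by a find-header-then-skip-span decomposition
-- (outer copy loop + inner block-skipping helper); objective: alternative decomposition, same cost.

-- shared per-line helpers (both Pythons test exactly these conditions)
-- line.rstrip() == f"  {name}:" or line.startswith(f"  {name}: ")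
def pvIsHeader (name line : String) : Bool :=
  PySem.Str.rstrip line == "  " ++ name ++ ":" || PySem.Str.startswith line ("  " ++ name ++ ": ")

-- 'if result and result[-1].strip() == "": result.pop()'  (accumulators are kept reversed, so [-1] is the head)
def pvPopBlank (out : List String) : List String :=
  match out with
  | [] => []
  | r :: rs => if PySem.Str.strip r == "" then rs else r :: rs

-- ===== PORT A =====
-- A's single while-loop with the in_block/found flags; result accumulator reversed (append = cons).
def pvGoA (name : String) : List String → List String → Bool → Bool → List String × Bool
  | [], result, _in_block, found => (result, found)
  | line :: rest, result, in_block, found =>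
    let stripped := PySem.Str.lstrip line
    let indent := PySem.Str.len line - PySem.Str.len stripped
    if pvIsHeader name line then
      pvGoA name rest (pvPopBlank result) true true
    else if in_block then
      if !(stripped == "") && indent ≤ 2 then
        pvGoA name rest (line :: result) false found
      else
        pvGoA name rest result true found
    else
      pvGoA name rest (line :: result) false found

def delete_dimension_block (content : String) (name : String) : String × Bool :=
  -- content.split("\n"): split? is none only for an empty separator, so getD is never taken
  let lines := (PySem.Str.split? content "\n").getD []
  let r := pvGoA name lines [] false false
  (PySem.Str.join "\n" r.1.reverse, r.2)

-- ===== PORT B =====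
-- B's inner helper _skip_block: consume block-body lines, return (out', remaining lines).
def pvSkipB (name : String) : List String → List String → List String × List String
  | [], out => (out, [])
  | line :: rest, out =>
    if pvIsHeader name line then
      pvSkipB name rest (pvPopBlank out)
    else if PySem.Str.lstrip line == "" || PySem.Str.len line - PySem.Str.len (PySem.Str.lstrip line) > 2 then
      pvSkipB name rest out
    else
      (out, line :: rest)

theorem pvSkipB_len (name : String) : ∀ (lines out : List String),
    (pvSkipB name lines out).2.length ≤ lines.length := by
  intro lines
  induction lines with
  | nil => intro out; simp [pvSkipB]
  | cons line rest ih =>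
    intro out
    simp only [pvSkipB]
    split
    · exact le_trans (ih _) (Nat.le_succ _)
    · split
      · exact le_trans (ih _) (Nat.le_succ _)
      · simp

-- B's outer copy loop (out accumulator reversed, append = cons).
def pvOuterB (name : String) : List String → List String → Bool → List String × Bool
  | [], out, found => (out, found)
  | line :: rest, out, found =>
    if pvIsHeader name line then
      let p := pvSkipB name rest (pvPopBlank out)
      pvOuterB name p.2 p.1 true
    else
      pvOuterB name rest (line :: out) found
termination_by lines => lines.length
decreasing_by
  · exact Nat.lt_succ_of_le (pvSkipB_len name rest (pvPopBlank out))
  · simp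

def delete_dimension_block_alt (content : String) (name : String) : String × Bool :=
  let lines := (PySem.Str.split? content "\n").getD []
  let r := pvOuterB name lines [] false
  (PySem.Str.join "\n" r.1.reverse, r.2)

-- ===== PRECONDITION & SPEC =====
def Spec_delete_dimension_block (content : String) (name : String) (out : String × Bool) : Prop := out = delete_dimension_block_alt content name
instance (content : String) (name : String) (out : String × Bool) : Decidable (Spec_delete_dimension_block content name out) := by unfold Spec_delete_dimension_block; infer_instance

-- ===== CLAIM (what is proved, stated in full; the proofs are below) =====
def Claim_equal_delete_dimension_block : Prop := ∀ (content : String) (name : String), Dom_delete_dimension_block content name → Spec_delete_dimension_block content name (delete_dimension_block content name)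

-- ===== LEMMAS AND PROOFS =====

-- A's loop with in_block = false is B's outer loop; with in_block = true (and found = true,
-- the only reachable combination) it is B's skip-then-outer composition.
theorem pvAB (name : String) : ∀ (n : Nat) (lines : List String), lines.length = n →
    (∀ out found, pvGoA name lines out false found = pvOuterB name lines out found) ∧
    (∀ out, pvGoA name lines out true true =
      pvOuterB name (pvSkipB name lines out).2 (pvSkipB name lines out).1 true) := by
  intro n
  induction n using Nat.strong_induction_on with
  | _ n ih =>
    intro lines hlen
    cases lines with
    | nil =>
      constructor
      · intro out found; simp [pvGoA, pvOuterB]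
      · intro out; simp [pvGoA, pvSkipB, pvOuterB]
    | cons line rest =>
      have hr := ih rest.length (by simp at hlen; omega) rest rfl
      constructor
      · intro out found
        by_cases hh : pvIsHeader name line = true
        · simp [pvGoA, pvOuterB, hh, hr.2]
        · simp [pvGoA, pvOuterB, hh, hr.1]
      · intro out
        by_cases hh : pvIsHeader name line = true
        · simp [pvGoA, pvSkipB, hh, hr.2]
        · by_cases hb : (PySem.Str.lstrip line == "") = true
          · simp [pvGoA, pvSkipB, hh, hb, hr.2]
          · by_cases hi : PySem.Str.len line - PySem.Str.len (PySem.Str.lstrip line) ≤ 2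
            · -- block-end line: A appends and leaves the block; B breaks and lets the outer loop copy it
              simp [pvGoA, pvSkipB, hh, hb, hr.1, hr.2]
              simp [PySem.Str.len] at hi
              rw [if_pos (by omega), if_neg (by omega)]
              simp [pvOuterB, hh]
            · simp [pvGoA, pvSkipB, hh, hb, hr.1, hr.2]
              simp [PySem.Str.len] at hi
              rw [if_neg (by omega), if_pos (by omega)]

-- ===== VERDICT (by name: the statement is the Claim_ definition above) =====
theorem delete_dimension_block_spec : Claim_equal_delete_dimension_block := by
  intro content name _
  unfold Spec_delete_dimension_block
  simp only [delete_dimension_block, delete_dimension_block_alt]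
  rw [(pvAB name _ _ rfl).1 [] false]
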